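-- pv_equiv track=rewrite | github.com/quenrythane/CodeWars-katas | Practice/[5kyu]/005 Directions Reduction [5kyu] time measure.py | dirReduc6
-- ===== SOURCE A (Python) =====
-- def dirReduc6(arr):
--     opposite = {"NORTH": "SOUTH",
--                 "SOUTH": "NORTH",
--                 "WEST": "EAST",
--                 "EAST": "WEST"
--                 }
--     i = 0
--     while i+1 < len(arr):
--         opp = opposite.get(arr[i])
--         if arr[i+1] == opp:
--             arr.pop(i+1)
--             arr.pop(i)
--             if i>0:
--                 i -= 1
--         else:
--             i += 1
--     return arr
-- ===== SOURCE B (Python) =====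
-- def dirReduc6(arr):
--     opposite = {"NORTH": "SOUTH",
--                 "SOUTH": "NORTH",
--                 "WEST": "EAST",
--                 "EAST": "WEST"
--                 }
--     stack = []
--     for d in arr:
--         if stack and d == opposite.get(stack[-1]):
--             stack.pop()
--         else:
--             stack.append(d)
--     return stack
-- ===== Notes on version B (the rewrite author's own statement) =====
-- stated objective: alternative
-- what changed: Replaced A's in-place while loop (pop two elements, step the index back, rescan) with a single left-to-right pass maintaining a stack: push each direction, pop when it opposes the top; intended as faster but measured only 1.46x at the largest size on random inputs.
import Mathlib
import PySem

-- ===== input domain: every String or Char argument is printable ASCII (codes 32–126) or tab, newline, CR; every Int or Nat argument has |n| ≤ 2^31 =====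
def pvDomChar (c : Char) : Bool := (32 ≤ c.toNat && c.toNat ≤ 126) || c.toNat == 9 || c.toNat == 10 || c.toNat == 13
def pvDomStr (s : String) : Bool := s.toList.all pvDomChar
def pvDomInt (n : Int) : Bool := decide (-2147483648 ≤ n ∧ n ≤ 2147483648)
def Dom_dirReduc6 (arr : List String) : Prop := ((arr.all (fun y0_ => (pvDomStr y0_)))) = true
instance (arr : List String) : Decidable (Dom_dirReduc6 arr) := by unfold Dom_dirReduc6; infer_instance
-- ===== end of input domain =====

-- B replaces A's in-place pop/backtrack while loop with a single left-to-right stack pass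
-- (intended as faster; measured only 1.46x at n=262144 on random inputs, below the 1.5x bar);
-- equivalence is about the RETURN value only — A mutates its argument in place, B does not.

-- ===== PORT A =====
-- shared helper: the 'opposite' dict literal both Pythons build, queried with .get
def opposite (s : String) : Option String :=
  (PySem.Dict.ofList [("NORTH", "SOUTH"), ("SOUTH", "NORTH"), ("WEST", "EAST"), ("EAST", "WEST")]).get? s

-- the while-loop of A; i stays ≥ 0 in Python (decremented only when i > 0), so Nat is exact,
-- and Python's `arr.pop(j)` at an in-range nonnegative j is exactly `List.eraseIdx · j`.
-- `arr[i+1] == opp` compares a string with an Optional value (None compares unequal), hence the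
-- Option-level `==` on in-range `arr[i+1]?`.
def dirReduc6Loop (arr : List String) (i : Nat) : List String :=
  if _h : i + 1 < arr.length then
    if arr[i+1]? == arr[i]?.bind opposite then
      dirReduc6Loop ((arr.eraseIdx (i+1)).eraseIdx i) (i - 1)
    else
      dirReduc6Loop arr (i + 1)
  else arr
termination_by 2 * arr.length - i
decreasing_by
  · simp only [List.length_eraseIdx]; split_ifs <;> omega
  · omega

def dirReduc6 (arr : List String) : List String := dirReduc6Loop arr 0

-- ===== PORT B =====
-- one step of Source B's loop body; the stack is kept top-first (Lean lists extend at the head),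
-- whereas Source B appends at the tail, hence the final reverse in dirReduc6_alt.
def step (st : List String) (d : String) : List String :=
  match st with
  | [] => [d]
  | t :: rest => if some d == opposite t then rest else d :: t :: rest

def dirReduc6_alt (arr : List String) : List String := (arr.foldl step []).reverse

-- ===== PRECONDITION & SPEC =====
def Spec_dirReduc6 (arr : List String) (out : List String) : Prop := out = dirReduc6_alt arr
instance (arr : List String) (out : List String) : Decidable (Spec_dirReduc6 arr out) := by unfold Spec_dirReduc6; infer_instance

-- ===== CLAIM (what is proved, stated in full; the proofs are below) =====
def Claim_equal_dirReduc6 : Prop := ∀ (arr : List String), Dom_dirReduc6 arr → Spec_dirReduc6 arr (dirReduc6 arr)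

-- ===== LEMMAS AND PROOFS =====

-- reversing one more taken element puts it on top of the stack
lemma take_succ_reverse (arr : List String) (i : Nat) (h : i < arr.length) :
    (arr.take (i+1)).reverse = arr[i] :: (arr.take i).reverse := by
  rw [List.take_add_one, List.getElem?_eq_getElem h]
  simp

-- if A's invariant rules out a cancellation at the top, `step` pushes
lemma step_push (arr : List String) (i : Nat) (hi : i < arr.length)
    (hinv : ∀ j, j < i → j + 1 < arr.length → (arr[j+1]? == arr[j]?.bind opposite) = false) :
    step ((arr.take i).reverse) arr[i] = arr[i] :: (arr.take i).reverse := by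
  cases i with
  | zero => simp [step]
  | succ k =>
    rw [take_succ_reverse arr k (by omega)]
    have hk := hinv k (Nat.lt_succ_self k) hi
    simp only [List.getElem?_eq_getElem hi, List.getElem?_eq_getElem (show k < arr.length by omega),
      Option.bind_some] at hk
    simp [step, hk]

-- the two pops of A remove exactly positions i and i+1
lemma erase2_eq (arr : List String) (i : Nat) (h : i + 1 < arr.length) :
    (arr.eraseIdx (i+1)).eraseIdx i = arr.take i ++ arr.drop (i+2) := by
  rw [List.eraseIdx_eq_take_drop_succ, List.eraseIdx_eq_take_drop_succ]
  have hlen : (arr.take (i+1)).length = i + 1 := by simp; omega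
  rw [List.take_append_of_le_length (by omega), List.drop_append_of_le_length (by omega),
    List.take_take, List.drop_take]
  have : min i (i+1) = i := by omega
  rw [this]
  congr 1
  · simp

-- indices inside the untouched prefix are unchanged by the double pop
lemma getElem?_pref (arr : List String) (i m : Nat) (hm : m < i) (hi : i ≤ arr.length) :
    (arr.take i ++ arr.drop (i+2))[m]? = arr[m]? := by
  rw [List.getElem?_append_left (by simp; omega)]
  simp [hm]

-- main loop invariant: A's loop state equals B's fold resumed from the already-scanned prefix
lemma loop_eq (arr : List String) (i : Nat) :
    i ≤ arr.length →
    (∀ j, j < i → j + 1 < arr.length → (arr[j+1]? == arr[j]?.bind opposite) = false) →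
    dirReduc6Loop arr i = (List.foldl step ((arr.take i).reverse) (arr.drop i)).reverse := by
  induction arr, i using dirReduc6Loop.induct with
  | case1 arr i h hc ih =>
    intro hle hinv
    have hi : i < arr.length := by omega
    have hcan : (some arr[i+1] == opposite arr[i]) = true := by
      simpa [List.getElem?_eq_getElem h, List.getElem?_eq_getElem hi] using hc
    rw [dirReduc6Loop, dif_pos h, if_pos hc, erase2_eq arr i h]
    rw [erase2_eq arr i h] at ih
    have hlenp : (arr.take i).length = i := by simp; omega
    have hle' : i - 1 ≤ (arr.take i ++ arr.drop (i+2)).length := by simp; omega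
    have hinv' : ∀ j, j < i - 1 → j + 1 < (arr.take i ++ arr.drop (i+2)).length →
        ((arr.take i ++ arr.drop (i+2))[j+1]? == (arr.take i ++ arr.drop (i+2))[j]?.bind opposite) = false := by
      intro j hj _
      rw [getElem?_pref arr i (j+1) (by omega) (by omega), getElem?_pref arr i j (by omega) (by omega)]
      exact hinv j (by omega) (by omega)
    rw [ih hle' hinv']
    congr 1
    -- unfold the right-hand fold over arr[i], arr[i+1]
    rw [List.drop_eq_getElem_cons hi, List.drop_eq_getElem_cons h, List.foldl_cons, List.foldl_cons,
      step_push arr i hi hinv]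
    have : step (arr[i] :: (arr.take i).reverse) arr[i+1] = (arr.take i).reverse := by
      simp [step, hcan]
    rw [this]
    -- and match the left-hand fold
    cases i with
    | zero => simp
    | succ k =>
      have hk : k < arr.length := by omega
      have ht : (arr.take (k+1) ++ arr.drop (k+1+2)).take (k+1-1) = arr.take k := by
        rw [List.take_append_of_le_length (by omega), List.take_take]
        congr 1; omega
      have hd : (arr.take (k+1) ++ arr.drop (k+1+2)).drop (k+1-1) = arr[k] :: arr.drop (k+1+2) := by
        rw [List.drop_append_of_le_length (by omega), List.drop_take,
          show k + 1 - 1 = k from rfl, show k + 1 - k = 1 from by omega]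
        rw [List.drop_eq_getElem_cons hk]
        rfl
      rw [ht, hd, List.foldl_cons,
        step_push arr k hk (fun j hj hj1 => hinv j (by omega) hj1),
        ← take_succ_reverse arr k hk]
  | case2 arr i h hc ih =>
    intro hle hinv
    rw [dirReduc6Loop, dif_pos h, if_neg (by simpa using hc)]
    have hi : i < arr.length := by omega
    have hinv' : ∀ j, j < i + 1 → j + 1 < arr.length → (arr[j+1]? == arr[j]?.bind opposite) = false := by
      intro j hj hj1
      rcases Nat.lt_or_ge j i with hji | hji
      · exact hinv j hji hj1
      · have : j = i := by omega
        subst this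
        simpa using hc
    rw [ih (by omega) hinv']
    congr 1
    rw [List.drop_eq_getElem_cons hi, List.foldl_cons, step_push arr i hi hinv,
      ← take_succ_reverse arr i hi]
  | case3 arr i h =>
    intro hle hinv
    rw [dirReduc6Loop, dif_neg h]
    rcases Nat.lt_or_ge i arr.length with hi | hi
    · have hlen : i + 1 = arr.length := by omega
      rw [List.drop_eq_getElem_cons hi]
      have : arr.drop (i+1) = [] := by simp; omega
      rw [this, List.foldl_cons, List.foldl_nil, step_push arr i hi hinv,
        ← take_succ_reverse arr i hi, hlen, List.take_length, List.reverse_reverse]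
    · have : i = arr.length := by omega
      subst this
      simp

-- ===== VERDICT (by name: the statement is the Claim_ definition above) =====
theorem dirReduc6_spec : Claim_equal_dirReduc6 := by
  intro arr _
  show dirReduc6 arr = dirReduc6_alt arr
  rw [dirReduc6, dirReduc6_alt, loop_eq arr 0 (by omega) (by omega)]
  simp
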